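-- pv_equiv track=rewrite | github.com/Llunarstack/sdx | utils/anatomy_correction.py | suggest_pose_corrections
-- ===== SOURCE A (Python) =====
-- from typing import Any, Dict, List, Optional, Tuple
--
-- def suggest_pose_corrections(pose_description: str) -> List[str]:
--     """Suggest corrections for problematic pose descriptions."""
--     suggestions = []
--     description_lower = pose_description.lower()
--
--     # Check for hand-related issues
--     if "hands" in description_lower:
--         suggestions.extend(
--             [
--                 "Specify 'five fingers on each hand' for accuracy",
--                 "Add 'natural hand pose' to avoid twisted fingers",
--                 "Consider 'detailed hands' for better finger definition",
--             ]
--         )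
--
--     # Check for complex interactions
--     if any(word in description_lower for word in ["holding", "touching", "grabbing"]):
--         suggestions.extend(
--             [
--                 "Break complex interactions into simpler components",
--                 "Specify exact hand positions for object interactions",
--                 "Consider generating objects and people separately, then compositing",
--             ]
--         )
--
--     # Check for multiple people
--     if any(word in description_lower for word in ["two people", "couple", "group"]):
--         suggestions.extend(
--             [
--                 "Generate each person separately for better anatomy",
--                 "Use clear spatial descriptions (left person, right person)",
--                 "Avoid overlapping bodies which cause anatomy issues",
--             ]
--         )
--
--     # Check for unusual poses
--     unusual_poses = ["upside down", "twisted", "contorted", "impossible"]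
--     if any(pose in description_lower for pose in unusual_poses):
--         suggestions.extend(
--             [
--                 "Consider if the pose is physically possible",
--                 "Break complex poses into multiple generation steps",
--                 "Use reference images for unusual poses",
--             ]
--         )
--
--     return suggestions
-- ===== SOURCE B (Python) =====
-- from typing import List
--
-- # (pattern, rule_id): all keywords flattened into one multi-pattern table.
-- _PATTERNS = [
--     ("hands", 0),
--     ("holding", 1), ("touching", 1), ("grabbing", 1),
--     ("two people", 2), ("couple", 2), ("group", 2),
--     ("upside down", 3), ("twisted", 3), ("contorted", 3), ("impossible", 3),
-- ]
--
-- _ADVICE = [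
--     (0, ["Specify 'five fingers on each hand' for accuracy",
--          "Add 'natural hand pose' to avoid twisted fingers",
--          "Consider 'detailed hands' for better finger definition"]),
--     (1, ["Break complex interactions into simpler components",
--          "Specify exact hand positions for object interactions",
--          "Consider generating objects and people separately, then compositing"]),
--     (2, ["Generate each person separately for better anatomy",
--          "Use clear spatial descriptions (left person, right person)",
--          "Avoid overlapping bodies which cause anatomy issues"]),
--     (3, ["Consider if the pose is physically possible",
--          "Break complex poses into multiple generation steps",
--          "Use reference images for unusual poses"]),
-- ]
--
-- def _matched_rules(text: str) -> set:
--     # Single left-to-right scan: naive multi-pattern matching at every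
--     # position, collecting the ids of the matched rules.
--     matched = set()
--     for i in range(len(text) + 1):
--         rest = text[i:]
--         for pat, rule_id in _PATTERNS:
--             if rest.startswith(pat):
--                 matched.add(rule_id)
--     return matched
--
-- def suggest_pose_corrections(pose_description: str) -> List[str]:
--     matched = _matched_rules(pose_description.lower())
--     out: List[str] = []
--     for rule_id, advice in _ADVICE:
--         if rule_id in matched:
--             out.extend(advice)
--     return out
-- ===== Notes on version B (the rewrite author's own statement) =====
-- stated objective: alternative
-- what changed: Instead of A's four branch blocks each doing per-keyword Python substring-membership tests, B does one left-to-right scan over the lowered text, at each position trying every keyword of a flattened (keyword, rule id) table as a prefix (naive multi-pattern matching), collecting matched rule ids into a set, then emits the advice blocks whose rule id was matched.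
import Mathlib
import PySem

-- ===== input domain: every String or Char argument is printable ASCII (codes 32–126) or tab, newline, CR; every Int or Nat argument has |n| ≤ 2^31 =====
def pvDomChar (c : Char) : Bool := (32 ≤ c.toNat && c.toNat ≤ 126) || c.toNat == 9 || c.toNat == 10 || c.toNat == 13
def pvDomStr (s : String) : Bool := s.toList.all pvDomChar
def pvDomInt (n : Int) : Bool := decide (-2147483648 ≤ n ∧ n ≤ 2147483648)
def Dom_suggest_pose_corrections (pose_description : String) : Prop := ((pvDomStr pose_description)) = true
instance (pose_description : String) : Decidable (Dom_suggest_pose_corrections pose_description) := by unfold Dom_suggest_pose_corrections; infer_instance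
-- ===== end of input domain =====

-- B replaces A's per-keyword substring tests with one left-to-right scan of the text
-- (naive multi-pattern prefix matching into a set of matched rule ids); objective: alternative.

-- ===== PORT A =====
def suggest_pose_corrections (pose_description : String) : List String :=
  let suggestions : List String := []
  let description_lower := PySem.Str.lower pose_description
  let suggestions :=
    if PySem.Str.isIn "hands" description_lower then
      suggestions ++
        ["Specify 'five fingers on each hand' for accuracy",
         "Add 'natural hand pose' to avoid twisted fingers",
         "Consider 'detailed hands' for better finger definition"]
    else suggestions
  let suggestions :=
    if (["holding", "touching", "grabbing"].any fun word => PySem.Str.isIn word description_lower) then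
      suggestions ++
        ["Break complex interactions into simpler components",
         "Specify exact hand positions for object interactions",
         "Consider generating objects and people separately, then compositing"]
    else suggestions
  let suggestions :=
    if (["two people", "couple", "group"].any fun word => PySem.Str.isIn word description_lower) then
      suggestions ++
        ["Generate each person separately for better anatomy",
         "Use clear spatial descriptions (left person, right person)",
         "Avoid overlapping bodies which cause anatomy issues"]
    else suggestions
  let unusual_poses := ["upside down", "twisted", "contorted", "impossible"]
  let suggestions :=
    if (unusual_poses.any fun pose => PySem.Str.isIn pose description_lower) then
      suggestions ++
        ["Consider if the pose is physically possible",
         "Break complex poses into multiple generation steps",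
         "Use reference images for unusual poses"]
    else suggestions
  suggestions

-- ===== PORT B =====
-- flattened (keyword, rule id) multi-pattern table (strings as char lists)
def pvPatterns : List (List Char × Nat) :=
  [("hands".toList, 0),
   ("holding".toList, 1), ("touching".toList, 1), ("grabbing".toList, 1),
   ("two people".toList, 2), ("couple".toList, 2), ("group".toList, 2),
   ("upside down".toList, 3), ("twisted".toList, 3), ("contorted".toList, 3),
   ("impossible".toList, 3)]

def pvAdvice : List (Nat × List String) :=
  [(0, ["Specify 'five fingers on each hand' for accuracy",
        "Add 'natural hand pose' to avoid twisted fingers",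
        "Consider 'detailed hands' for better finger definition"]),
   (1, ["Break complex interactions into simpler components",
        "Specify exact hand positions for object interactions",
        "Consider generating objects and people separately, then compositing"]),
   (2, ["Generate each person separately for better anatomy",
        "Use clear spatial descriptions (left person, right person)",
        "Avoid overlapping bodies which cause anatomy issues"]),
   (3, ["Consider if the pose is physically possible",
        "Break complex poses into multiple generation steps",
        "Use reference images for unusual poses"])]

-- one scan over the text: at each position try every keyword as a prefix
def pvMatchedRules (text : List Char) : PySem.Set Nat :=
  (List.range (text.length + 1)).foldl
    (fun m i =>
      pvPatterns.foldl
        (fun m pr => if PySem.Chars.startswith (text.drop i) pr.1 then PySem.Set.add m pr.2 else m)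
        m)
    PySem.Set.empty

def suggest_pose_corrections_alt (pose_description : String) : List String :=
  let matched := pvMatchedRules (PySem.Chars.lower pose_description.toList)
  pvAdvice.foldl
    (fun (out : List String) e =>
      if PySem.Set.contains matched e.1 then out ++ e.2 else out)
    []

-- ===== PRECONDITION & SPEC =====
def Spec_suggest_pose_corrections (pose_description : String) (out : List String) : Prop := out = suggest_pose_corrections_alt pose_description
instance (pose_description : String) (out : List String) : Decidable (Spec_suggest_pose_corrections pose_description out) := by unfold Spec_suggest_pose_corrections; infer_instance

-- ===== CLAIM (what is proved, stated in full; the proofs are below) =====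
def Claim_equal_suggest_pose_corrections : Prop := ∀ (pose_description : String), Dom_suggest_pose_corrections pose_description → Spec_suggest_pose_corrections pose_description (suggest_pose_corrections pose_description)

-- ===== LEMMAS AND PROOFS =====

-- membership in the inner fold over the pattern table
lemma mem_inner_fold (ps : List (List Char × Nat)) (rest : List Char) (m : PySem.Set Nat) (r : Nat) :
    r ∈ ps.foldl (fun m pr => if PySem.Chars.startswith rest pr.1 then PySem.Set.add m pr.2 else m) m
      ↔ r ∈ m ∨ ∃ pr ∈ ps, pr.2 = r ∧ PySem.Chars.startswith rest pr.1 = true := by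
  induction ps generalizing m with
  | nil => simp
  | cons p ps ih =>
    simp only [List.foldl_cons, ih, List.mem_cons]
    by_cases h : PySem.Chars.startswith rest p.1 = true
    · simp [h, PySem.Set.mem_add]
      constructor
      · rintro ((h' | h') | h')
        · exact Or.inl h'
        · exact Or.inr (Or.inl h'.symm)
        · exact Or.inr (Or.inr h')
      · rintro (h' | h' | h')
        · exact Or.inl (Or.inl h')
        · exact Or.inl (Or.inr h'.symm)
        · exact Or.inr h'
    · simp [h]

-- membership in the position scan
lemma mem_scan_fold (is : List Nat) (text : List Char) (m : PySem.Set Nat) (r : Nat) :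
    r ∈ is.foldl
        (fun m i =>
          pvPatterns.foldl
            (fun m pr => if PySem.Chars.startswith (text.drop i) pr.1 then PySem.Set.add m pr.2 else m) m)
        m
      ↔ r ∈ m ∨ ∃ i ∈ is, ∃ pr ∈ pvPatterns, pr.2 = r ∧ PySem.Chars.startswith (text.drop i) pr.1 = true := by
  induction is generalizing m with
  | nil => simp
  | cons i is ih =>
    simp only [List.foldl_cons, ih, mem_inner_fold, List.mem_cons]
    constructor
    · rintro ((h | ⟨pr, hpr, hr, hs⟩) | ⟨i', hi', pr, hpr, hr, hs⟩)
      · exact Or.inl h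
      · exact Or.inr ⟨i, Or.inl rfl, pr, hpr, hr, hs⟩
      · exact Or.inr ⟨i', Or.inr hi', pr, hpr, hr, hs⟩
    · rintro (h | ⟨i', (rfl | hi'), pr, hpr, hr, hs⟩)
      · exact Or.inl (Or.inl h)
      · exact Or.inl (Or.inr ⟨pr, hpr, hr, hs⟩)
      · exact Or.inr ⟨i', hi', pr, hpr, hr, hs⟩

-- a matched rule id means: some keyword of that rule occurs in the text, and conversely
lemma mem_matched_iff (text : List Char) (r : Nat) :
    r ∈ pvMatchedRules text
      ↔ ∃ pr ∈ pvPatterns, pr.2 = r ∧ PySem.Chars.isIn pr.1 text = true := by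
  unfold pvMatchedRules
  rw [mem_scan_fold]
  constructor
  · rintro (h | ⟨i, _, pr, hpr, hrid, hpre⟩)
    · cases h
    · exact ⟨pr, hpr, hrid, (PySem.Chars.exists_prefix_drop_iff_isIn _ _).1
        ⟨i, (PySem.Chars.startswith_iff _ _).1 hpre⟩⟩
  · rintro ⟨pr, hpr, hrid, hin⟩
    obtain ⟨j, hj⟩ := (PySem.Chars.exists_prefix_drop_iff_isIn _ _).2 hin
    have hne : pr.1 ≠ [] := by
      fin_cases hpr <;> decide
    have hjle : j ≤ text.length := by
      by_contra h
      rw [not_le] at h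
      have : text.drop j = [] := List.drop_eq_nil_of_le (le_of_lt h)
      rw [this] at hj
      exact hne (List.prefix_nil.mp hj)
    exact Or.inr ⟨j, List.mem_range.mpr (by omega), pr, hpr, hrid,
      (PySem.Chars.startswith_iff _ _).2 hj⟩

lemma contains_matchedRules (text : List Char) (r : Nat) :
    (PySem.Set.contains (pvMatchedRules text) r = true)
      ↔ ∃ pr ∈ pvPatterns, pr.2 = r ∧ PySem.Chars.isIn pr.1 text = true := by
  rw [PySem.Set.contains_iff]
  exact mem_matched_iff text r

-- ===== VERDICT (by name: the statement is the Claim_ definition above) =====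
theorem suggest_pose_corrections_spec : Claim_equal_suggest_pose_corrections := by
  intro p _
  unfold Spec_suggest_pose_corrections suggest_pose_corrections suggest_pose_corrections_alt
  have h0 : PySem.Set.contains (pvMatchedRules (PySem.Chars.lower p.toList)) 0
      = PySem.Chars.isIn "hands".toList (PySem.Chars.lower p.toList) := by
    rw [Bool.eq_iff_iff, contains_matchedRules]
    simp [pvPatterns]
  have h1 : PySem.Set.contains (pvMatchedRules (PySem.Chars.lower p.toList)) 1
      = (["holding", "touching", "grabbing"].any fun word => PySem.Chars.isIn word.toList (PySem.Chars.lower p.toList)) := by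
    rw [Bool.eq_iff_iff, contains_matchedRules]
    simp [pvPatterns]
  have h2 : PySem.Set.contains (pvMatchedRules (PySem.Chars.lower p.toList)) 2
      = (["two people", "couple", "group"].any fun word => PySem.Chars.isIn word.toList (PySem.Chars.lower p.toList)) := by
    rw [Bool.eq_iff_iff, contains_matchedRules]
    simp [pvPatterns]
  have h3 : PySem.Set.contains (pvMatchedRules (PySem.Chars.lower p.toList)) 3
      = (["upside down", "twisted", "contorted", "impossible"].any fun word => PySem.Chars.isIn word.toList (PySem.Chars.lower p.toList)) := by
    rw [Bool.eq_iff_iff, contains_matchedRules]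
    simp [pvPatterns]
  simp only [pvAdvice, List.foldl_cons, List.foldl_nil, h0, h1, h2, h3,
    PySem.Str.isIn_eq, PySem.Str.toList_lower, List.any_cons, List.any_nil]
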